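-- pv_equiv track=rewrite | github.com/gsterner/isingcomp | src/generate_system.py | create_periodic_nearest_neighbour_connections
-- ===== SOURCE A (Python) =====
-- def has_periodic_right_connection(j_row, j_col, spin_dimension):
--     if j_col % spin_dimension == 0 and j_row == j_col + spin_dimension - 1:
--         return True
--     return False
--
-- def has_periodic_left_connection(j_row, j_col, spin_dimension):
--     if (j_col + 1) % spin_dimension == 0 and j_row == j_col - spin_dimension + 1:
--         return True
--     return False
--
-- def has_periodic_down_connection(j_row, j_col, spin_dimension):
--     if j_col < spin_dimension and spin_dimension * (spin_dimension - 1) <= j_row and j_row < spin_dimension * spin_dimension and j_row - j_col == spin_dimension * (spin_dimension - 1):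
--         return True
--     return False
--
-- def has_periodic_up_connection(j_row, j_col, spin_dimension):
--     if j_row < spin_dimension and spin_dimension * (spin_dimension - 1) <= j_col and j_col < spin_dimension * spin_dimension and j_col - j_row == spin_dimension * (spin_dimension - 1):
--         return True
--     return False
--
-- def has_periodic_connection(j_row, j_col, spin_dimension):
--     return has_periodic_right_connection(j_row, j_col, spin_dimension) or has_periodic_left_connection(j_row, j_col, spin_dimension) or has_periodic_down_connection(j_row, j_col, spin_dimension) or has_periodic_up_connection(j_row, j_col, spin_dimension)
--
-- def create_periodic_nearest_neighbour_connections(rows, cols, connection_value):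
--     #assume square spin matrix rows = cols
--     spin_dimension = rows
--     dimension = rows * cols
--     connection_matrix = []
--     for j_row in range(dimension):
--         row_list = []
--         for j_col in range(dimension):
--             if has_periodic_connection(j_row, j_col, spin_dimension):
--                 row_list.append(connection_value)
--             else:
--                 row_list.append(0)
--         connection_matrix.append(row_list)
--     return connection_matrix
-- ===== SOURCE B (Python) =====
-- def create_periodic_nearest_neighbour_connections(rows, cols, connection_value):
--     # Directly place the (at most four) periodic-boundary entries per row
--     # instead of testing every (row, col) pair.
--     sd = rows
--     dim = rows * cols
--     wrap = sd * (sd - 1)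
--     matrix = []
--     for j in range(dim):
--         row = [0] * dim
--         c = j - sd + 1          # right-edge wrap partner
--         if 0 <= c < dim and c % sd == 0:
--             row[c] = connection_value
--         c = j + sd - 1          # left-edge wrap partner
--         if 0 <= c < dim and (c + 1) % sd == 0:
--             row[c] = connection_value
--         c = j - wrap            # bottom-edge wrap partner
--         if 0 <= c < dim and c < sd and wrap <= j < sd * sd:
--             row[c] = connection_value
--         c = j + wrap            # top-edge wrap partner
--         if 0 <= c < dim and j < sd and wrap <= c < sd * sd:
--             row[c] = connection_value
--         matrix.append(row)
--     return matrix
-- ===== Notes on version B (the rewrite author's own statement) =====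
-- stated objective: alternative
-- what changed: Instead of testing the periodic-connection predicate for every (row, col) pair, B starts each row as zeros and directly places the at-most-four periodic neighbour entries at columns computed by inverting each predicate's equality.
import Mathlib
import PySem

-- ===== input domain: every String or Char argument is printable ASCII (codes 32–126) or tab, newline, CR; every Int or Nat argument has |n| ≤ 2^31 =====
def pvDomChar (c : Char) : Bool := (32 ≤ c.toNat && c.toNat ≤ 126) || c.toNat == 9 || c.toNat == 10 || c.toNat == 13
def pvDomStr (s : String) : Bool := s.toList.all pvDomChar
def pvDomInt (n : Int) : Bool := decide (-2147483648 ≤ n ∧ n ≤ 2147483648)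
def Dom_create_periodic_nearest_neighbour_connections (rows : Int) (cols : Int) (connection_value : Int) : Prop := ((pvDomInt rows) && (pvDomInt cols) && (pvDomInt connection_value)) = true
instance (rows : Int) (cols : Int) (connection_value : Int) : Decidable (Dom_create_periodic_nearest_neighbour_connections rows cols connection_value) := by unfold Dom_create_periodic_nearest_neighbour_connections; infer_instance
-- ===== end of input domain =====

-- B places the at-most-four periodic entries of each row directly instead of testing every (row, col) pair.

-- ===== PORT A =====
def has_periodic_right_connection (j_row j_col spin_dimension : Int) : Bool :=
  if PySem.Int.mod j_col spin_dimension = 0 ∧ j_row = j_col + spin_dimension - 1 then true else false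

def has_periodic_left_connection (j_row j_col spin_dimension : Int) : Bool :=
  if PySem.Int.mod (j_col + 1) spin_dimension = 0 ∧ j_row = j_col - spin_dimension + 1 then true else false

def has_periodic_down_connection (j_row j_col spin_dimension : Int) : Bool :=
  if j_col < spin_dimension ∧ spin_dimension * (spin_dimension - 1) ≤ j_row ∧ j_row < spin_dimension * spin_dimension ∧ j_row - j_col = spin_dimension * (spin_dimension - 1) then true else false

def has_periodic_up_connection (j_row j_col spin_dimension : Int) : Bool :=
  if j_row < spin_dimension ∧ spin_dimension * (spin_dimension - 1) ≤ j_col ∧ j_col < spin_dimension * spin_dimension ∧ j_col - j_row = spin_dimension * (spin_dimension - 1) then true else false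

def has_periodic_connection (j_row j_col spin_dimension : Int) : Bool :=
  has_periodic_right_connection j_row j_col spin_dimension ||
  has_periodic_left_connection j_row j_col spin_dimension ||
  has_periodic_down_connection j_row j_col spin_dimension ||
  has_periodic_up_connection j_row j_col spin_dimension

def create_periodic_nearest_neighbour_connections (rows : Int) (cols : Int) (connection_value : Int) : List (List Int) :=
  let spin_dimension := rows
  let dimension := rows * cols
  (PySem.List.pyRange 0 dimension 1).map (fun j_row =>
    (PySem.List.pyRange 0 dimension 1).map (fun j_col =>
      if has_periodic_connection j_row j_col spin_dimension then connection_value else 0))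

-- ===== PORT B =====
-- row[c] = connection_value guarded by the range test and the kept condition (B's `if 0 <= c < dim and keep`)
def pvSetNeighbour (row : List Int) (c dim cv : Int) (keep : Bool) : List Int :=
  if 0 ≤ c ∧ c < dim ∧ keep = true then row.set c.toNat cv else row

def create_periodic_nearest_neighbour_connections_alt (rows : Int) (cols : Int) (connection_value : Int) : List (List Int) :=
  let sd := rows
  let dim := rows * cols
  let wrap := sd * (sd - 1)
  (PySem.List.pyRange 0 dim 1).map (fun j =>
    let row := List.replicate dim.toNat 0
    let row := pvSetNeighbour row (j - sd + 1) dim connection_value (decide (PySem.Int.mod (j - sd + 1) sd = 0))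
    let row := pvSetNeighbour row (j + sd - 1) dim connection_value (decide (PySem.Int.mod (j + sd - 1 + 1) sd = 0))
    let row := pvSetNeighbour row (j - wrap) dim connection_value (decide (j - wrap < sd ∧ wrap ≤ j ∧ j < sd * sd))
    let row := pvSetNeighbour row (j + wrap) dim connection_value (decide (j < sd ∧ wrap ≤ j + wrap ∧ j + wrap < sd * sd))
    row)

-- ===== PRECONDITION & SPEC =====
def Spec_create_periodic_nearest_neighbour_connections (rows : Int) (cols : Int) (connection_value : Int) (out : List (List Int)) : Prop := out = create_periodic_nearest_neighbour_connections_alt rows cols connection_value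
instance (rows : Int) (cols : Int) (connection_value : Int) (out : List (List Int)) : Decidable (Spec_create_periodic_nearest_neighbour_connections rows cols connection_value out) := by unfold Spec_create_periodic_nearest_neighbour_connections; infer_instance

-- ===== CLAIM (what is proved, stated in full; the proofs are below) =====
def Claim_equal_create_periodic_nearest_neighbour_connections : Prop := ∀ (rows : Int) (cols : Int) (connection_value : Int), Dom_create_periodic_nearest_neighbour_connections rows cols connection_value → Spec_create_periodic_nearest_neighbour_connections rows cols connection_value (create_periodic_nearest_neighbour_connections rows cols connection_value)

-- ===== LEMMAS AND PROOFS =====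

lemma pyRange_zero_toNat (d : Int) :
    PySem.List.pyRange 0 d = (List.range d.toNat).map (fun (k : Nat) => (k : Int)) := by
  rcases (by omega : 0 ≤ d ∨ d < 0) with h | h
  · obtain ⟨n, rfl⟩ : ∃ n : Nat, d = (n : Int) := ⟨d.toNat, by omega⟩
    rw [PySem.List.pyRange_zero_natCast]
    simp
  · have h1 : d.toNat = 0 := by omega
    rw [h1]
    simp [PySem.List.pyRange, show ¬(0:Int) < d by omega]

lemma set_map_range (d : Nat) (f : Nat → Int) (n : Nat) (v : Int) (_hn : n < d) :
    ((List.range d).map f).set n v = (List.range d).map (fun i => if i = n then v else f i) := by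
  apply List.ext_getElem
  · simp
  · intro i h1 h2
    simp only [List.getElem_set, List.getElem_map, List.getElem_range]
    by_cases h : n = i
    · subst h; simp
    · rw [if_neg h, if_neg (fun hh => h hh.symm)]

-- the match condition of one placed neighbour entry, read at column i
def pvCand (c dim : Int) (keep : Bool) (i : Nat) : Bool :=
  decide (0 ≤ c) && decide (c < dim) && keep && decide (c = (i : Int))

lemma setNeighbour_map_range (d : Nat) (dim : Int) (hdim : dim ≤ (d : Int))
    (f : Nat → Int) (c cv : Int) (keep : Bool) :
    pvSetNeighbour ((List.range d).map f) c dim cv keep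
      = (List.range d).map (fun i => if pvCand c dim keep i then cv else f i) := by
  unfold pvSetNeighbour
  split_ifs with h
  · obtain ⟨h0, h1, h2⟩ := h
    rw [set_map_range d f c.toNat cv (by omega)]
    apply List.map_congr_left
    intro i hi
    have hiff : (i = c.toNat) ↔ (pvCand c dim keep i = true) := by
      unfold pvCand; simp [h0, h1, h2]; omega
    by_cases hic : i = c.toNat
    · rw [if_pos hic, if_pos (hiff.mp hic)]
    · rw [if_neg hic, if_neg (fun hh => hic (hiff.mpr hh))]
  · apply List.map_congr_left
    intro i _
    have hf : pvCand c dim keep i = false := by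
      unfold pvCand
      by_contra hb
      simp only [Bool.not_eq_false, Bool.and_eq_true, decide_eq_true_eq] at hb
      exact h ⟨hb.1.1.1, hb.1.1.2, hb.1.2⟩
    rw [hf]; simp

lemma nested_if_or (a b c d : Bool) (v : Int) :
    (if a then v else if b then v else if c then v else if d then v else 0)
      = (if (a || b || c || d) then v else 0) := by
  cases a <;> cases b <;> cases c <;> cases d <;> simp

lemma cond_iff (sd dim j : Int) (i : Nat) (hi : (i : Int) < dim) :
    has_periodic_connection j (i : Int) sd
      = (pvCand (j + sd * (sd - 1)) dim (decide (j < sd ∧ sd * (sd - 1) ≤ j + sd * (sd - 1) ∧ j + sd * (sd - 1) < sd * sd)) i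
        || pvCand (j - sd * (sd - 1)) dim (decide (j - sd * (sd - 1) < sd ∧ sd * (sd - 1) ≤ j ∧ j < sd * sd)) i
        || pvCand (j + sd - 1) dim (decide (PySem.Int.mod (j + sd - 1 + 1) sd = 0)) i
        || pvCand (j - sd + 1) dim (decide (PySem.Int.mod (j - sd + 1) sd = 0)) i) := by
  have hi0 : (0:Int) ≤ (i:Int) := Int.natCast_nonneg i
  have hr : ∀ a b c : Int, has_periodic_right_connection a b c = true ↔ (PySem.Int.mod b c = 0 ∧ a = b + c - 1) := by
    intro a b c; unfold has_periodic_right_connection; split_ifs with h <;> simp [h]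
  have hl : ∀ a b c : Int, has_periodic_left_connection a b c = true ↔ (PySem.Int.mod (b + 1) c = 0 ∧ a = b - c + 1) := by
    intro a b c; unfold has_periodic_left_connection; split_ifs with h <;> simp [h]
  have hd : ∀ a b c : Int, has_periodic_down_connection a b c = true ↔ (b < c ∧ c * (c - 1) ≤ a ∧ a < c * c ∧ a - b = c * (c - 1)) := by
    intro a b c; unfold has_periodic_down_connection; split_ifs with h <;> simp [h]
  have hu : ∀ a b c : Int, has_periodic_up_connection a b c = true ↔ (a < c ∧ c * (c - 1) ≤ b ∧ b < c * c ∧ b - a = c * (c - 1)) := by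
    intro a b c; unfold has_periodic_up_connection; split_ifs with h <;> simp [h]
  rw [Bool.eq_iff_iff]
  simp only [has_periodic_connection, Bool.or_eq_true, hr, hl, hd, hu, pvCand,
    Bool.and_eq_true, decide_eq_true_eq]
  set w := sd * (sd - 1) with hw
  set s2 := sd * sd with hs
  clear hw hs
  constructor
  · rintro (((⟨hm, hj⟩ | ⟨hm, hj⟩) | ⟨h1, h2, h3, h4⟩) | ⟨h1, h2, h3, h4⟩)
    · have hc : j - sd + 1 = (i : Int) := by omega
      refine Or.inr ?_
      rw [hc]; exact ⟨⟨⟨hi0, hi⟩, hm⟩, rfl⟩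
    · have hc : j + sd - 1 = (i : Int) := by omega
      refine Or.inl (Or.inr ?_)
      rw [hc]; exact ⟨⟨⟨hi0, hi⟩, hm⟩, rfl⟩
    · exact Or.inl (Or.inl (Or.inr (by omega)))
    · exact Or.inl (Or.inl (Or.inl (by omega)))
  · rintro (((⟨⟨⟨hb1, hb2⟩, hk⟩, hc⟩ | ⟨⟨⟨hb1, hb2⟩, hk⟩, hc⟩) | ⟨⟨⟨hb1, hb2⟩, hk⟩, hc⟩) | ⟨⟨⟨hb1, hb2⟩, hk⟩, hc⟩)
    · exact Or.inr (by omega)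
    · exact Or.inl (Or.inr (by omega))
    · refine Or.inl (Or.inl (Or.inr ?_))
      rw [← hc]; exact ⟨hk, by ring⟩
    · refine Or.inl (Or.inl (Or.inl ?_))
      rw [← hc]; exact ⟨hk, by ring⟩

lemma row_eq (sd dim cv j : Int) (hdim : dim ≤ ((dim.toNat : Nat) : Int)) :
    (List.range dim.toNat).map (fun (i : Nat) =>
        if has_periodic_connection j (i : Int) sd then cv else 0)
      = pvSetNeighbour (pvSetNeighbour (pvSetNeighbour (pvSetNeighbour
          (List.replicate dim.toNat 0)
          (j - sd + 1) dim cv (decide (PySem.Int.mod (j - sd + 1) sd = 0)))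
          (j + sd - 1) dim cv (decide (PySem.Int.mod (j + sd - 1 + 1) sd = 0)))
          (j - sd * (sd - 1)) dim cv (decide (j - sd * (sd - 1) < sd ∧ sd * (sd - 1) ≤ j ∧ j < sd * sd)))
          (j + sd * (sd - 1)) dim cv (decide (j < sd ∧ sd * (sd - 1) ≤ j + sd * (sd - 1) ∧ j + sd * (sd - 1) < sd * sd)) := by
  have hrep : List.replicate dim.toNat (0 : Int) = (List.range dim.toNat).map (fun _ => 0) := by
    simp [List.map_const']
  rw [hrep,
    setNeighbour_map_range dim.toNat dim hdim,
    setNeighbour_map_range dim.toNat dim hdim,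
    setNeighbour_map_range dim.toNat dim hdim,
    setNeighbour_map_range dim.toNat dim hdim]
  apply List.map_congr_left
  intro i hi
  have hlt : (i : Int) < dim := by
    have := List.mem_range.mp hi; omega
  rw [nested_if_or, cond_iff sd dim j i hlt]

-- ===== VERDICT (by name: the statement is the Claim_ definition above) =====
theorem create_periodic_nearest_neighbour_connections_spec : Claim_equal_create_periodic_nearest_neighbour_connections := by
  intro rows cols cv _
  unfold Spec_create_periodic_nearest_neighbour_connections
  unfold create_periodic_nearest_neighbour_connections create_periodic_nearest_neighbour_connections_alt
  simp only [pyRange_zero_toNat, List.map_map]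
  apply List.map_congr_left
  intro j _
  simp only [Function.comp_def]
  exact row_eq rows (rows * cols) cv (j : Int) (by omega)
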